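-- pv_equiv track=rewrite | github.com/gsc-lab/course-ml-basic | agent/verify_problem.py | diff_lines
-- ===== SOURCE A (Python) =====
-- def diff_lines(expected: str, actual: str, max_lines: int = 10) -> str:
--     a = expected.splitlines()
--     b = actual.splitlines()
--     out: list[str] = []
--     n = max(len(a), len(b))
--     shown = 0
--     for i in range(n):
--         ax = a[i] if i < len(a) else '(EOF)'
--         bx = b[i] if i < len(b) else '(EOF)'
--         if ax != bx:
--             out.append(f'  L{i+1}: expected = {ax!r}')
--             out.append(f'  L{i+1}: actual   = {bx!r}')
--             shown += 1
--             if shown >= max_lines: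
--                 out.append(f'  … (이후 차이 생략)')
--                 break
--     return '\n'.join(out) if out else '  (차이 없음 — 정규화 후 일치)'
-- ===== SOURCE B (Python) =====
-- def diff_lines(expected: str, actual: str, max_lines: int = 10) -> str:
--     a = expected.splitlines()
--     b = actual.splitlines()
--     n = max(len(a), len(b))
--     a = a + ['(EOF)'] * (n - len(a))
--     b = b + ['(EOF)'] * (n - len(b))
--     diffs = [(i, x, y) for i, (x, y) in enumerate(zip(a, b)) if x != y]
--     if not diffs:
--         return '  (차이 없음 — 정규화 후 일치)'
--     out = []
--     for k, (i, x, y) in enumerate(diffs):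
--         out.append(f'  L{i+1}: expected = {x!r}')
--         out.append(f'  L{i+1}: actual   = {y!r}')
--         if k + 1 >= max_lines:
--             out.append('  … (이후 차이 생략)')
--             break
--     return '\n'.join(out)
-- ===== Notes on version B (the rewrite author's own statement) =====
-- stated objective: alternative
-- what changed: A's single fused loop that formats while scanning and breaks early is split into two passes: one detection pass over the zipped padded line lists building the full list of differing (i, expected, actual) triples, then a separate formatting pass over that list that stops after max_lines entries.
import Mathlib
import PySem

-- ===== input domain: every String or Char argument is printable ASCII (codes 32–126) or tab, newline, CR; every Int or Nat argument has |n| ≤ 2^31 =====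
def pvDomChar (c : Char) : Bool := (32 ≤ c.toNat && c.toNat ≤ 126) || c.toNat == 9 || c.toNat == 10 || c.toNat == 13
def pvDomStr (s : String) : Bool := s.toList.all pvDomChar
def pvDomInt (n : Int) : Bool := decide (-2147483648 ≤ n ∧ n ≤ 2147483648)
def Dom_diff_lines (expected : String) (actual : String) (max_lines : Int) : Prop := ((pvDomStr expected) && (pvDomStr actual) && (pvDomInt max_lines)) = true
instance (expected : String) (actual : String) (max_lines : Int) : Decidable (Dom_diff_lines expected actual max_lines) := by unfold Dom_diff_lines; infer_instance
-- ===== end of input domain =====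

-- B restructures A's fused early-exiting loop into two passes (detect all differing line pairs, then format a prefix);
-- objective: alternative decomposition, same return value on every input.

-- shared primitive: Python's repr() of a str, exact for printable-ASCII + tab content
-- (lines produced by splitlines contain no '\n' or '\r'); both Pythons use the f-string {x!r}.
def pyReprChar (q : Char) (c : Char) : List Char :=
  if c = '\\' then ['\\', '\\']
  else if c = q then ['\\', q]
  else if c = '\t' then ['\\', 't']
  else [c]

def pyRepr (s : String) : String :=
  let cs := s.toList
  let q : Char := if cs.contains '\'' && !cs.contains '"' then '"' else '\''
  String.ofList ([q] ++ cs.flatMap (pyReprChar q) ++ [q])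

-- ===== PORT A =====
-- the fused loop of A: walk the indices, appending to `out` and counting `shown`, break on shown >= max_lines
-- `a[i] if i < len(a) else '(EOF)'` is the guard + in-range index (pyGetD is exact there)
def diffLoopA (a b : List String) (max_lines : Int) : List Int → List String → Int → List String
  | [], out, _ => out
  | i :: rest, out, shown =>
    let ax := if i < (PySem.List.len a : Int) then PySem.List.pyGetD a i "(EOF)" else "(EOF)"
    let bx := if i < (PySem.List.len b : Int) then PySem.List.pyGetD b i "(EOF)" else "(EOF)"
    if ax ≠ bx then
      let out2 := out ++ ["  L" ++ PySem.Int.toStr (i + 1) ++ ": expected = " ++ pyRepr ax,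
                          "  L" ++ PySem.Int.toStr (i + 1) ++ ": actual   = " ++ pyRepr bx]
      let shown2 := shown + 1
      if shown2 ≥ max_lines then out2 ++ ["  … (이후 차이 생략)"]
      else diffLoopA a b max_lines rest out2 shown2
    else diffLoopA a b max_lines rest out shown

def diff_lines (expected : String) (actual : String) (max_lines : Int) : String :=
  let a := PySem.Str.splitlines expected
  let b := PySem.Str.splitlines actual
  let n := max a.length b.length
  let out := diffLoopA a b max_lines (PySem.List.pyRange 0 (n : Int) 1) [] 0
  if out ≠ [] then PySem.Str.join "\n" out else "  (차이 없음 — 정규화 후 일치)"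

-- ===== PORT B =====
-- B's formatting pass: walk the detected diffs with enumerate counter k, stop after max_lines entries
def fmtDiffsB (max_lines : Int) : List (Int × String × String) → Int → List String
  | [], _ => []
  | (i, x, y) :: rest, k =>
    ["  L" ++ PySem.Int.toStr (i + 1) ++ ": expected = " ++ pyRepr x,
     "  L" ++ PySem.Int.toStr (i + 1) ++ ": actual   = " ++ pyRepr y] ++
    (if k + 1 ≥ max_lines then ["  … (이후 차이 생략)"] else fmtDiffsB max_lines rest (k + 1))

def diff_lines_alt (expected : String) (actual : String) (max_lines : Int) : String :=
  let a := PySem.Str.splitlines expected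
  let b := PySem.Str.splitlines actual
  let n := max a.length b.length
  let a2 := a ++ List.replicate (n - a.length) "(EOF)"
  let b2 := b ++ List.replicate (n - b.length) "(EOF)"
  let diffs := (PySem.List.enumerate (a2.zip b2) 0).filter (fun p => p.2.1 != p.2.2)
  if diffs = [] then "  (차이 없음 — 정규화 후 일치)"
  else PySem.Str.join "\n" (fmtDiffsB max_lines diffs 0)

-- ===== PRECONDITION & SPEC =====
def Spec_diff_lines (expected : String) (actual : String) (max_lines : Int) (out : String) : Prop := out = diff_lines_alt expected actual max_lines
instance (expected : String) (actual : String) (max_lines : Int) (out : String) : Decidable (Spec_diff_lines expected actual max_lines out) := by unfold Spec_diff_lines; infer_instance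

-- ===== CLAIM (what is proved, stated in full; the proofs are below) =====
def Claim_equal_diff_lines : Prop := ∀ (expected : String) (actual : String) (max_lines : Int), Dom_diff_lines expected actual max_lines → Spec_diff_lines expected actual max_lines (diff_lines expected actual max_lines)

-- ===== LEMMAS AND PROOFS =====

theorem fmtDiffsB_eq_nil_iff (m : Int) (ds : List (Int × String × String)) (k : Int) :
    fmtDiffsB m ds k = [] ↔ ds = [] := by
  cases ds with
  | nil => simp [fmtDiffsB]
  | cons d rest => obtain ⟨i, x, y⟩ := d; simp [fmtDiffsB]

-- the per-index element A reads, via padded lists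
theorem padded_get (a : List String) (n j : Nat) (hj : j < n) (ha : a.length ≤ n) :
    (if (j : Int) < (PySem.List.len a : Int) then PySem.List.pyGetD a (j : Int) "(EOF)" else "(EOF)")
      = (a ++ List.replicate (n - a.length) "(EOF)").getD j "(EOF)" := by
  by_cases h : j < a.length
  · rw [if_pos (by simp [PySem.List.len]; exact_mod_cast h)]
    rw [PySem.List.pyGetD_natCast]
    rw [List.getD_eq_getElem _ _ h, List.getD_eq_getElem _ _ (by simp [List.length_append]; omega)]
    rw [List.getElem_append_left h]
  · rw [if_neg (by simp [PySem.List.len]; omega)]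
    rw [List.getD_eq_getElem _ _ (by simp [List.length_append]; omega)]
    rw [List.getElem_append_right (by omega)]
    simp

-- main invariant: A's fused loop = out ++ B's formatting pass over the detected diffs
theorem loopA_eq_fmt (a b : List String) (m : Int) (n : Nat)
    (ha : a.length ≤ n) (hb : b.length ≤ n)
    (js : List Nat) (hjs : ∀ j ∈ js, j < n) (out : List String) (shown : Int) :
    diffLoopA a b m (js.map (fun (j : Nat) => (j : Int))) out shown
      = out ++ fmtDiffsB m
          ((js.map (fun (j : Nat) => ((j : Int),
              (a ++ List.replicate (n - a.length) "(EOF)").getD j "(EOF)",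
              (b ++ List.replicate (n - b.length) "(EOF)").getD j "(EOF)"))).filter
            (fun p => p.2.1 != p.2.2)) shown := by
  induction js generalizing out shown with
  | nil => simp [diffLoopA, fmtDiffsB]
  | cons j rest ih =>
    have hj : j < n := hjs j (List.mem_cons_self)
    have hrest : ∀ x ∈ rest, x < n := fun x hx => hjs x (List.mem_cons_of_mem _ hx)
    simp only [List.map_cons, diffLoopA]
    rw [padded_get a n j hj ha, padded_get b n j hj hb]
    set ax := (a ++ List.replicate (n - a.length) "(EOF)").getD j "(EOF)" with hax
    set bx := (b ++ List.replicate (n - b.length) "(EOF)").getD j "(EOF)" with hbx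
    by_cases hne : ax = bx
    · rw [if_neg (by simp [hne])]
      rw [List.filter_cons_of_neg (by simp [hne])]
      exact ih hrest out shown
    · rw [if_pos hne]
      rw [List.filter_cons_of_pos (by simp [hne])]
      by_cases hstop : shown + 1 ≥ m
      · rw [if_pos hstop]
        simp only [fmtDiffsB, if_pos hstop]
        simp [List.append_assoc]
      · rw [if_neg hstop]
        rw [ih hrest _ (shown + 1)]
        simp only [fmtDiffsB, if_neg hstop]
        simp [List.append_assoc]

-- B's enumerate(zip(...)) diff list, written over List.range
theorem enum_zip_eq (a2 b2 : List String) (n : Nat) (ha : a2.length = n) (hb : b2.length = n) :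
    PySem.List.enumerate (a2.zip b2) 0
      = (List.range n).map (fun (j : Nat) => ((j : Int), a2.getD j "(EOF)", b2.getD j "(EOF)")) := by
  apply List.ext_getElem
  · simp [PySem.List.length_enumerate, List.length_zip, ha, hb]
  · intro k h1 h2
    have hk : k < n := by simpa [List.length_range] using h2
    have hka : k < a2.length := by omega
    have hkb : k < b2.length := by omega
    rw [PySem.List.getElem_enumerate]
    simp [List.getElem_zip, List.getElem?_eq_getElem hka, List.getElem?_eq_getElem hkb]

-- ===== VERDICT (by name: the statement is the Claim_ definition above) =====
theorem diff_lines_spec : Claim_equal_diff_lines := by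
  intro expected actual max_lines _
  unfold Spec_diff_lines
  simp only [diff_lines, diff_lines_alt]
  set a := PySem.Str.splitlines expected with hA
  set b := PySem.Str.splitlines actual with hB
  set n := max a.length b.length with hN
  have hrange : PySem.List.pyRange 0 (n : Int) 1 = (List.range n).map (fun (j : Nat) => (j : Int)) := by
    rw [PySem.List.pyRange_zero_natCast]
  rw [hrange]
  rw [loopA_eq_fmt a b max_lines n (le_max_left _ _) (le_max_right _ _)
      (List.range n) (fun j hj => List.mem_range.mp hj) [] 0]
  rw [enum_zip_eq (a ++ List.replicate (n - a.length) "(EOF)")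
      (b ++ List.replicate (n - b.length) "(EOF)") n (by simp; omega) (by simp; omega)]
  set ds := ((List.range n).map (fun (j : Nat) => ((j : Int),
      (a ++ List.replicate (n - a.length) "(EOF)").getD j "(EOF)",
      (b ++ List.replicate (n - b.length) "(EOF)").getD j "(EOF)"))).filter
    (fun p => p.2.1 != p.2.2) with hds
  simp only [List.nil_append]
  by_cases hempty : ds = []
  · rw [hempty]
    simp [fmtDiffsB]
  · rw [if_pos (by rw [Ne, fmtDiffsB_eq_nil_iff]; exact hempty), if_neg hempty]
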